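-- pv_equiv track=rewrite | github.com/shimonuri/weiz-stat-mec-exercise-1-v2 | combinations.py | iter_spins
-- ===== SOURCE A (Python) =====
-- def iter_spins(number_of_spins, number_of_positive_spins):
--     if number_of_positive_spins == 0:
--         yield [-1] * number_of_spins
--     elif number_of_positive_spins == number_of_spins:
--         yield [1] * number_of_spins
--     else:
--         for spins in iter_spins(number_of_spins - 1, number_of_positive_spins - 1):
--             yield [1] + spins
--         for spins in iter_spins(number_of_spins - 1, number_of_positive_spins):
--             yield [-1] + spins
-- ===== SOURCE B (Python) =====
-- def iter_spins(number_of_spins, number_of_positive_spins):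
--     # Iterative depth-first traversal with an explicit stack of
--     # (remaining length, remaining positive spins, prefix built so far)
--     # frames, instead of recursion.  The -1 branch is pushed first so the
--     # +1 branch is popped (and emitted) first.
--     stack = [(number_of_spins, number_of_positive_spins, [])]
--     while stack:
--         n, k, prefix = stack.pop()
--         if k == 0:
--             yield prefix + [-1] * n
--         elif k == n:
--             yield prefix + [1] * n
--         else:
--             stack.append((n - 1, k, prefix + [-1]))
--             stack.append((n - 1, k - 1, prefix + [1]))
-- ===== Notes on version B (the rewrite author's own statement) =====
-- stated objective: alternative
-- what changed: Replaces A's recursive generator with an iterative depth-first traversal that keeps an explicit stack of (remaining length, remaining positives, prefix) frames and pops/pushes frames in a single while loop, producing the same configurations in the same order without recursion.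
import Mathlib
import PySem

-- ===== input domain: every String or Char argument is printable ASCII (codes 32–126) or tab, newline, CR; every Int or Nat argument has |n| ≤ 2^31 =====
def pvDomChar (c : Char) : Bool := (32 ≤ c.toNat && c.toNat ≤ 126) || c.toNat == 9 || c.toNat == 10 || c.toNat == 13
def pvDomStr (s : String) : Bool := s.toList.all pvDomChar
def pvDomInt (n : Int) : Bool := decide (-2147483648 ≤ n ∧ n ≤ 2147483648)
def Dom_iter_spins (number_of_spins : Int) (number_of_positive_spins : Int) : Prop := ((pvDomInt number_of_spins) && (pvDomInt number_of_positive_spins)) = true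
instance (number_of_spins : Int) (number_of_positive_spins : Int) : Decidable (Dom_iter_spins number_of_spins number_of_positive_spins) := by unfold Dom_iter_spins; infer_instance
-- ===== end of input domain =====

-- B replaces A's recursive generator by an iterative depth-first traversal with an
-- explicit stack (alternative decomposition; same outputs in the same order).

-- ===== PORT A =====
-- A is a recursive generator; the port materialises the yielded lists in order.
-- The fuel argument exists only to make the Lean function total: on the inputs
-- Pre_ admits, A's recursion depth is at most number_of_spins, so fuel
-- n.toNat + 1 never runs out (the 0-fuel branch is unreachable there).
-- '[-1] * n' for n < 0 is [] in Python; List.replicate n.toNat matches that exactly.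
def iterSpinsFuel : Nat → Int → Int → List (List Int)
  | 0, _, _ => []
  | f + 1, n, k =>
    if k = 0 then [List.replicate n.toNat (-1)]
    else if k = n then [List.replicate n.toNat 1]
    else (iterSpinsFuel f (n - 1) (k - 1)).map (fun s => 1 :: s)
         ++ (iterSpinsFuel f (n - 1) k).map (fun s => (-1) :: s)

def iter_spins (number_of_spins : Int) (number_of_positive_spins : Int) : List (List Int) :=
  iterSpinsFuel (number_of_spins.toNat + 1) number_of_spins number_of_positive_spins

-- ===== PORT B =====
-- B's while loop over the explicit stack; the list head is the stack top (Python
-- pushes the -1 frame before the +1 frame, so the +1 frame is on top).  The fuel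
-- argument only makes the loop total in Lean: on inputs Pre_ admits the loop runs
-- exactly nodes-many iterations (< 2^(n+1), see nodes_le below), so fuel never
-- runs out there.  'prefix + [-1] * n' with n < 0 is 'prefix' in Python;
-- List.replicate n.toNat matches that exactly.
def bLoop : Nat → List (Int × Int × List Int) → List (List Int) → List (List Int)
  | 0, _, out => out
  | _ + 1, [], out => out
  | f + 1, (n, k, pre) :: rest, out =>
    if k = 0 then bLoop f rest (out ++ [pre ++ List.replicate n.toNat (-1)])
    else if k = n then bLoop f rest (out ++ [pre ++ List.replicate n.toNat 1])
    else bLoop f ((n - 1, k - 1, pre ++ [1]) :: (n - 1, k, pre ++ [-1]) :: rest) out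

def iter_spins_alt (number_of_spins : Int) (number_of_positive_spins : Int) : List (List Int) :=
  bLoop (2 ^ (number_of_spins.toNat + 1))
    [(number_of_spins, number_of_positive_spins, [])] []

-- ===== PRECONDITION & SPEC =====
-- A raises RecursionError whenever k < 0 ≠ n, or 0 < k and k > n (its recursion never
-- bottoms out there); Pre_ excludes exactly those inputs and nothing else: it keeps
-- every input on which A returns, including k = 0 with negative n and k = n < 0
-- (on both of which A and B return [[]]).
def Pre_iter_spins (number_of_spins : Int) (number_of_positive_spins : Int) : Prop :=
  number_of_positive_spins = 0 ∨
    (0 < number_of_positive_spins ∧ number_of_positive_spins ≤ number_of_spins) ∨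
    (number_of_positive_spins = number_of_spins ∧ number_of_spins < 0)

instance (number_of_spins : Int) (number_of_positive_spins : Int) : Decidable (Pre_iter_spins number_of_spins number_of_positive_spins) := by unfold Pre_iter_spins; infer_instance

def pvWitness_iter_spins : Int × Int := (3, 1)

def Spec_iter_spins (number_of_spins : Int) (number_of_positive_spins : Int) (out : List (List Int)) : Prop := out = iter_spins_alt number_of_spins number_of_positive_spins
instance (number_of_spins : Int) (number_of_positive_spins : Int) (out : List (List Int)) : Decidable (Spec_iter_spins number_of_spins number_of_positive_spins out) := by unfold Spec_iter_spins; infer_instance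

-- ===== CLAIM (what is proved, stated in full; the proofs are below) =====
def Claim_equal_iter_spins : Prop := ∀ (number_of_spins : Int) (number_of_positive_spins : Int), Dom_iter_spins number_of_spins number_of_positive_spins → Pre_iter_spins number_of_spins number_of_positive_spins → Spec_iter_spins number_of_spins number_of_positive_spins (iter_spins number_of_spins number_of_positive_spins)

-- ===== LEMMAS AND PROOFS =====

-- reference value: configurations of length n with k positive spins, A's order
def refC : Nat → Nat → List (List Int)
  | 0, 0 => [[]]
  | 0, _ + 1 => []
  | n + 1, 0 => (refC n 0).map (fun c => (-1) :: c)
  | n + 1, k + 1 => (refC n k).map (fun c => 1 :: c) ++ (refC n (k + 1)).map (fun c => (-1) :: c)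

lemma refC_zero (n : Nat) : refC n 0 = [List.replicate n (-1)] := by
  induction n with
  | zero => rfl
  | succ n ih => simp [refC, ih, List.replicate]

lemma refC_gt : ∀ n k : Nat, n < k → refC n k = [] := by
  intro n
  induction n with
  | zero => intro k h; cases k with
      | zero => omega
      | succ k => rfl
  | succ n ih =>
      intro k h
      cases k with
      | zero => omega
      | succ k => simp [refC, ih k (by omega), ih (k + 1) (by omega)]

lemma refC_self (n : Nat) : refC n n = [List.replicate n 1] := by
  induction n with
  | zero => rfl
  | succ n ih => simp [refC, ih, refC_gt n (n + 1) (by omega), List.replicate]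

lemma iterSpinsFuel_eq_refC :
    ∀ (f : Nat) (n k : Int), 0 ≤ k → k ≤ n → n.toNat < f →
      iterSpinsFuel f n k = refC n.toNat k.toNat := by
  intro f
  induction f with
  | zero => intro n k _ _ h; omega
  | succ f ih =>
      intro n k hk0 hkn hf
      by_cases h0 : k = 0
      · subst h0; simp [iterSpinsFuel, refC_zero]
      · by_cases hn : k = n
        · subst hn; simp [iterSpinsFuel, h0, refC_self]
        · have hkpos : 0 < k := lt_of_le_of_ne hk0 (by intro h; exact h0 h.symm)
          have hklt : k < n := lt_of_le_of_ne hkn hn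
          obtain ⟨m, hm⟩ : ∃ m : Nat, n.toNat = m + 1 := ⟨n.toNat - 1, by omega⟩
          obtain ⟨j, hj⟩ : ∃ j : Nat, k.toNat = j + 1 := ⟨k.toNat - 1, by omega⟩
          have h1 : (n - 1).toNat = m := by omega
          have h2 : (k - 1).toNat = j := by omega
          have r1 := ih (n - 1) (k - 1) (by omega) (by omega) (by omega)
          have r2 := ih (n - 1) k (by omega) (by omega) (by omega)
          simp only [iterSpinsFuel, if_neg h0, if_neg hn, r1, r2, h1, h2, hm, hj]
          simp [refC]

-- iteration count of B's loop for one frame (number of recursion-tree nodes)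
def nodes : Nat → Nat → Nat
  | 0, _ => 1
  | n + 1, k =>
    if k = 0 then 1 else if k = n + 1 then 1 else nodes n (k - 1) + nodes n k + 1

lemma nodes_pos (n k : Nat) : 0 < nodes n k := by
  cases n with
  | zero => simp [nodes]
  | succ n => unfold nodes; split_ifs <;> omega

lemma nodes_le (n : Nat) : ∀ k : Nat, nodes n k ≤ 2 ^ (n + 1) - 1 := by
  induction n with
  | zero => intro k; simp [nodes]
  | succ n ih =>
      intro k
      have h1 := ih (k - 1)
      have h2 := ih k
      have hp : 0 < 2 ^ (n + 1) := Nat.two_pow_pos _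
      unfold nodes
      split_ifs <;> [skip; skip; rw [pow_succ]] <;> omega

-- loop invariant: with enough fuel and well-formed frames, B's loop appends to
-- out the configurations of every stack frame (prefix ++ each refC config)
lemma bLoop_eq :
    ∀ (f : Nat) (stack : List (Int × Int × List Int)) (out : List (List Int)),
      (∀ fr ∈ stack, fr.2.1 = 0 ∨ (0 < fr.2.1 ∧ fr.2.1 ≤ fr.1)) →
      (stack.map (fun fr => nodes fr.1.toNat fr.2.1.toNat)).sum ≤ f →
      bLoop f stack out =
        out ++ stack.flatMap
          (fun fr => (refC fr.1.toNat fr.2.1.toNat).map (fun c => fr.2.2 ++ c)) := by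
  intro f
  induction f with
  | zero =>
      intro stack out hgood hsum
      cases stack with
      | nil => simp [bLoop]
      | cons fr rest =>
          exfalso
          have := nodes_pos fr.1.toNat fr.2.1.toNat
          simp [List.map_cons, List.sum_cons] at hsum
          omega
  | succ f ih =>
      intro stack out hgood hsum
      cases stack with
      | nil => simp [bLoop]
      | cons fr rest =>
          obtain ⟨n, k, pre⟩ := fr
          have hhead : k = 0 ∨ (0 < k ∧ k ≤ n) := hgood (n, k, pre) (by simp)
          simp only [List.map_cons, List.sum_cons] at hsum
          have hpos := nodes_pos n.toNat k.toNat
          have hrest : (rest.map (fun fr => nodes fr.1.toNat fr.2.1.toNat)).sum ≤ f := by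
            omega
          by_cases h0 : k = 0
          · subst h0
            rw [show bLoop (f + 1) ((n, 0, pre) :: rest) out
                  = bLoop f rest (out ++ [pre ++ List.replicate n.toNat (-1)]) by
                simp [bLoop]]
            rw [ih rest _ (fun fr hf => hgood fr (by simp [hf])) hrest]
            simp [refC_zero]
          · by_cases hn : k = n
            · subst hn
              rw [show bLoop (f + 1) ((k, k, pre) :: rest) out
                    = bLoop f rest (out ++ [pre ++ List.replicate k.toNat 1]) by
                  simp [bLoop, h0]]
              rw [ih rest _ (fun fr hf => hgood fr (by simp [hf])) hrest]
              simp [refC_self]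
            · have hk0 : 0 < k := by rcases hhead with h | ⟨h, _⟩ <;> omega
              have hkn : k < n := by
                rcases hhead with h | ⟨_, h2⟩
                · omega
                · exact lt_of_le_of_ne h2 hn
              obtain ⟨m, hm⟩ : ∃ m : Nat, n.toNat = m + 1 := ⟨n.toNat - 1, by omega⟩
              obtain ⟨j, hj⟩ : ∃ j : Nat, k.toNat = j + 1 := ⟨k.toNat - 1, by omega⟩
              have e1 : (n - 1).toNat = m := by omega
              have e2 : (k - 1).toNat = j := by omega
              have hnodes : nodes n.toNat k.toNat = nodes m j + nodes m (j + 1) + 1 := by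
                rw [hm, hj]
                have hne : j ≠ m := by omega
                simp [nodes, hne]
              rw [show bLoop (f + 1) ((n, k, pre) :: rest) out
                    = bLoop f ((n - 1, k - 1, pre ++ [1]) :: (n - 1, k, pre ++ [-1]) :: rest) out by
                  simp [bLoop, h0, hn]]
              rw [ih _ _ ?_ ?_]
              · simp only [List.flatMap_cons, e1, e2, hm, hj]
                rw [show refC (m + 1) (j + 1)
                      = (refC m j).map (fun c => 1 :: c)
                        ++ (refC m (j + 1)).map (fun c => (-1) :: c) from rfl]
                simp [List.map_map, Function.comp_def]
              · intro fr hf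
                simp only [List.mem_cons] at hf
                rcases hf with h | h | h
                · subst h; simp; omega
                · subst h; simp; omega
                · exact hgood fr (by simp [h])
              · simp only [List.map_cons, List.sum_cons]
                simp only [e1, e2, hj]
                omega

lemma alt_eq_refC (n k : Int) (hpre : k = 0 ∨ (0 < k ∧ k ≤ n)) :
    iter_spins_alt n k = refC n.toNat k.toNat := by
  unfold iter_spins_alt
  rw [bLoop_eq _ _ _ (by intro fr hf; simp at hf; subst hf; exact hpre) ?_]
  · simp
  · have h1 := nodes_le n.toNat k.toNat
    have h2 : 0 < 2 ^ (n.toNat + 1) := Nat.two_pow_pos _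
    simp only [List.map_cons, List.map_nil, List.sum_cons, List.sum_nil]
    omega

-- ===== VERDICT (by name: the statement is the Claim_ definition above) =====
theorem iter_spins_spec : Claim_equal_iter_spins := by
  intro n k _ hpre
  unfold Spec_iter_spins
  rcases hpre with h0 | ⟨h1, h2⟩ | ⟨heq, hneg⟩
  · rw [alt_eq_refC n k (Or.inl h0)]
    subst h0
    simp [iter_spins, iterSpinsFuel, refC_zero]
  · rw [alt_eq_refC n k (Or.inr ⟨h1, h2⟩)]
    exact iterSpinsFuel_eq_refC _ n k (by omega) h2 (by omega)
  · -- k = n < 0: A yields '[1]*n' = [] once, B pops the single frame on its k = n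
    -- branch and yields '[] + [1]*n' = [] once
    subst heq
    have hk0 : k ≠ 0 := by omega
    have hkt : k.toNat = 0 := by omega
    simp only [iter_spins, iter_spins_alt, hkt]
    simp [iterSpinsFuel, bLoop, hk0, hkt]
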